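-- pv_equiv track=rewrite | github.com/sutd-automated-programming-tools/clara-s | tests/data/midterm/midterm/2018157/Q4/submission_1/q4_work.py | reduceM
-- ===== SOURCE A (Python) =====
-- def reduceM(m):
--     new1= []
--     new2 = []
--     new3=[]
--
--     for row in range(1,len(m)):
--         ls = []
--         for num in range(1,len(m[row])):
--             ls.append(m[row][num])
--         new1.append(ls)
--
--
--     for row in range(1,len(m)):
--             ls = []
--             for num in range(0,3,2):
--                 ls.append(m[row][num])
--             new2.append(ls)
--     for row in range(1,len(m)):
--             ls = []
--             for num in range(0,2):
--                 ls.append(m[row][num])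
--             new3.append(ls)
--
--
--     return new1,new2,new3
-- ===== SOURCE B (Python) =====
-- def reduceM(m):
--     new1 = []
--     new2 = []
--     new3 = []
--     i = len(m) - 1
--     while i >= 1:
--         r = m[i]
--         new1.append(r[1:])
--         new2.append([r[0], r[2]])
--         new3.append([r[0], r[1]])
--         i -= 1
--     new1.reverse()
--     new2.reverse()
--     new3.reverse()
--     return new1, new2, new3
-- ===== Notes on version B (the rewrite author's own statement) =====
-- stated objective: alternative
-- what changed: Replaces A's three separate forward index-range loops (each with an inner element-appending range loop) by one fused backward while-loop that walks the rows from the last down to index 1, building all three results back-to-front in accumulators and reversing them once at the end.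
import Mathlib
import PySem

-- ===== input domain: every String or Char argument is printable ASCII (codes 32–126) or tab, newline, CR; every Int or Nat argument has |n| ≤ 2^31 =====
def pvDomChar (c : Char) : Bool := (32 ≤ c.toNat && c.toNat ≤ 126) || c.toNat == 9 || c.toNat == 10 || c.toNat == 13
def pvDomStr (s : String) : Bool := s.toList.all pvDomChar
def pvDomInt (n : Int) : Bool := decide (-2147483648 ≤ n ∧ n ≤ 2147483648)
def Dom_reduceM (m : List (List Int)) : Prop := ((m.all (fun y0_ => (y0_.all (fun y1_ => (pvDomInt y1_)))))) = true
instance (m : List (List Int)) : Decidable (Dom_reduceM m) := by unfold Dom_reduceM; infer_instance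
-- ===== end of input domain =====

-- B fuses A's three separate forward range-loops into one backward while-loop that
-- builds all three lists back-to-front and reverses them once; objective: alternative.


-- ===== PORT A =====
-- literal transliteration of A: three foldl loops over range(1,len(m)), each with an
-- inner foldl over its range appending m[row][num]; pyGetD's default is only reached
-- where Python raises IndexError (excluded by Pre_reduceM).
def reduceM (m : List (List Int)) : List (List Int) × List (List Int) × List (List Int) :=
  let new1 := (PySem.List.pyRange 1 (PySem.List.len m) 1).foldl (fun acc row =>
    let ls := (PySem.List.pyRange 1 (PySem.List.len (PySem.List.pyGetD m row [])) 1).foldl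
      (fun ls num => ls ++ [PySem.List.pyGetD (PySem.List.pyGetD m row []) num 0]) []
    acc ++ [ls]) []
  let new2 := (PySem.List.pyRange 1 (PySem.List.len m) 1).foldl (fun acc row =>
    let ls := (PySem.List.pyRange 0 3 2).foldl
      (fun ls num => ls ++ [PySem.List.pyGetD (PySem.List.pyGetD m row []) num 0]) []
    acc ++ [ls]) []
  let new3 := (PySem.List.pyRange 1 (PySem.List.len m) 1).foldl (fun acc row =>
    let ls := (PySem.List.pyRange 0 2 1).foldl
      (fun ls num => ls ++ [PySem.List.pyGetD (PySem.List.pyGetD m row []) num 0]) []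
    acc ++ [ls]) []
  (new1, new2, new3)

-- ===== PORT B =====
-- literal transliteration of B's backward while-loop: the loop counter i (which in
-- Python counts len(m)-1, len(m)-2, …, 1 and stops when i < 1) is the structural
-- recursion argument; the three accumulators are the three Python lists, appended to
-- exactly as in Source B, and reversed once at the end.
def reduceMAltGo (m : List (List Int)) :
    Nat → List (List Int) → List (List Int) → List (List Int) →
    List (List Int) × List (List Int) × List (List Int)
  | 0, n1, n2, n3 => (n1, n2, n3)
  | i + 1, n1, n2, n3 =>
    let r := PySem.List.pyGetD m ((i : Int) + 1) []
    reduceMAltGo m i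
      (n1 ++ [PySem.List.slice r (some 1) none])
      (n2 ++ [[PySem.List.pyGetD r 0 0, PySem.List.pyGetD r 2 0]])
      (n3 ++ [[PySem.List.pyGetD r 0 0, PySem.List.pyGetD r 1 0]])

def reduceM_alt (m : List (List Int)) : List (List Int) × List (List Int) × List (List Int) :=
  let t := reduceMAltGo m (m.length - 1) [] [] []
  (t.1.reverse, t.2.1.reverse, t.2.2.reverse)

-- ===== PRECONDITION & SPEC =====
-- Pre_ excludes exactly the inputs where Python A raises IndexError: a row after the
-- first with fewer than 3 elements (the m[row][2] / m[row][0..1] accesses).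
def Pre_reduceM (m : List (List Int)) : Prop := ∀ r ∈ m.drop 1, 3 ≤ r.length
instance (m : List (List Int)) : Decidable (Pre_reduceM m) := by unfold Pre_reduceM; infer_instance
def pvWitness_reduceM : List (List Int) := [[1, 2, 3], [4, 5, 6], [7, 8, 9]]
def Spec_reduceM (m : List (List Int)) (out : List (List Int) × List (List Int) × List (List Int)) : Prop := out = reduceM_alt m
instance (m : List (List Int)) (out : List (List Int) × List (List Int) × List (List Int)) : Decidable (Spec_reduceM m out) := by unfold Spec_reduceM; infer_instance

-- ===== CLAIM (what is proved, stated in full; the proofs are below) =====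
def Claim_equal_reduceM : Prop := ∀ (m : List (List Int)), Dom_reduceM m → Pre_reduceM m → Spec_reduceM m (reduceM m)

-- ===== LEMMAS AND PROOFS =====

-- A's outer loop pattern: append f(m[row]) for row in range(1,len(m)) = map f over m[1:].
lemma outer_loop_eq_map {α β : Type} (xs : List α) (d : α) (f : α → β) :
    (PySem.List.pyRange 1 (PySem.List.len xs) 1).foldl
      (fun acc row => acc ++ [f (PySem.List.pyGetD xs row d)]) []
    = xs.tail.map f := by
  rw [PySem.List.foldl_append_singleton_eq_map, List.nil_append,
    show (fun row => f (PySem.List.pyGetD xs row d)) = f ∘ (fun row => PySem.List.pyGetD xs row d) from rfl,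
    ← List.map_map, PySem.List.map_pyGetD_pyRange xs d (a := 1) (by norm_num)]
  norm_num

-- reading a list element-by-element at every index gives back the list
lemma map_getD_range {α : Type} (l : List α) (d : α) :
    (List.range l.length).map (fun k => l.getD k d) = l := by
  apply List.ext_getElem
  · simp
  · intro i h1 h2
    simp [List.getD_eq_getElem?_getD, List.getElem?_eq_getElem h2]

-- mapping f over the elements m[1], …, m[len-1] read by index is mapping f over the tail
lemma range'_map_getD {α β : Type} (m : List α) (d : α) (f : α → β) :
    (List.range' 1 (m.length - 1)).map (fun j => f (m.getD j d)) = m.tail.map f := by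
  rw [List.range'_eq_map_range, List.map_map]
  cases m with
  | nil => simp
  | cons a t =>
    simp only [List.length_cons, Nat.add_sub_cancel, List.tail_cons]
    have : ∀ k, ((fun j => f ((a :: t).getD j d)) ∘ (fun k => 1 + k)) k
        = (f ∘ fun k => t.getD k d) k := by
      intro k; simp [Nat.add_comm 1 k]
    rw [List.map_congr_left (fun k _ => this k), ← List.map_map, map_getD_range]

-- the backward loop appends, in descending index order, one row-image per accumulator
lemma reduceMAltGo_eq (m : List (List Int)) (i : Nat)
    (n1 n2 n3 : List (List Int)) :
    reduceMAltGo m i n1 n2 n3 =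
      (n1 ++ (List.range' 1 i).reverse.map
        (fun j => PySem.List.slice (m.getD j []) (some 1) none),
       n2 ++ (List.range' 1 i).reverse.map
        (fun j => [PySem.List.pyGetD (m.getD j []) 0 0, PySem.List.pyGetD (m.getD j []) 2 0]),
       n3 ++ (List.range' 1 i).reverse.map
        (fun j => [PySem.List.pyGetD (m.getD j []) 0 0, PySem.List.pyGetD (m.getD j []) 1 0])) := by
  induction i generalizing n1 n2 n3 with
  | zero => simp [reduceMAltGo]
  | succ i ih =>
    have hr : List.range' 1 (i + 1) = List.range' 1 i ++ [1 + i] := List.range'_1_concat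
    have hcast : PySem.List.pyGetD m ((i : Int) + 1) [] = m.getD (1 + i) [] := by
      rw [show ((i : Int) + 1) = ((1 + i : Nat) : Int) by push_cast; ring,
        PySem.List.pyGetD_natCast]
    simp only [reduceMAltGo, ih, hr, hcast]
    simp [List.append_assoc]

-- ===== VERDICT (by name: the statement is the Claim_ definition above) =====
theorem reduceM_spec : Claim_equal_reduceM := by
  intro m _ _
  show reduceM m = reduceM_alt m
  unfold reduceM reduceM_alt
  rw [reduceMAltGo_eq]
  simp only [List.nil_append, List.map_reverse, List.reverse_reverse, Prod.mk.injEq]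
  refine ⟨?_, ?_, ?_⟩
  · rw [outer_loop_eq_map m []
      (fun r => List.foldl (fun ls num => ls ++ [PySem.List.pyGetD r num 0]) []
        (PySem.List.pyRange 1 (PySem.List.len r))),
      range'_map_getD m [] (fun r => PySem.List.slice r (some 1) none)]
    refine List.map_congr_left (fun r _ => ?_)
    rw [PySem.List.foldl_pyRange_pyGetD r 0 (fun ls v => ls ++ [v]) [] (a := 1) (by norm_num),
      PySem.List.foldl_append_singleton_eq_self, List.nil_append]
    simp [PySem.List.slice_from_one]
  · rw [outer_loop_eq_map m []
      (fun r => List.foldl (fun ls num => ls ++ [PySem.List.pyGetD r num 0]) []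
        (PySem.List.pyRange 0 3 2)),
      range'_map_getD m [] (fun r => [PySem.List.pyGetD r 0 0, PySem.List.pyGetD r 2 0])]
    rfl
  · rw [outer_loop_eq_map m []
      (fun r => List.foldl (fun ls num => ls ++ [PySem.List.pyGetD r num 0]) []
        (PySem.List.pyRange 0 2 1)),
      range'_map_getD m [] (fun r => [PySem.List.pyGetD r 0 0, PySem.List.pyGetD r 1 0])]
    rfl
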